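-- pv_equiv track=rewrite | github.com/axemanofic/clite | clite/parser.py | parse_multiple_values
-- ===== SOURCE A (Python) =====
-- def parse_multiple_values(
--     argv: list[str],
-- ) -> tuple[str, ...]:
--     values: list[str] = []
--     for idx, arg in enumerate(argv):
--         if arg.startswith("-"):
--             break
--         if arg.startswith('"') and arg.endswith('"'):
--             arg = arg[1:-1]
--         elif arg.startswith("'") and arg.endswith("'"):
--             arg = arg[1:-1]
--         values.append(arg)
--     return tuple(values)
-- ===== SOURCE B (Python) =====
-- def parse_multiple_values(
--     argv: list[str],
-- ) -> tuple[str, ...]: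
--     # Right-to-left fold: a flag token resets the accumulator, so what survives
--     # is exactly the prefix before the first flag; quotes are stripped as we go.
--     # The accumulator is kept in reversed order and flipped once at the end.
--     values: list[str] = []
--     for arg in reversed(argv):
--         if arg.startswith("-"):
--             values.clear()
--         elif arg and arg[0] == arg[-1] and arg[0] in "\"'":
--             values.append(arg[1:-1])
--         else:
--             values.append(arg)
--     return tuple(reversed(values))
-- ===== Notes on version B (the rewrite author's own statement) =====
-- stated objective: alternative
-- what changed: A scans left-to-right accumulating and breaking at the first flag; B folds the list right-to-left, resetting the accumulator to empty whenever a flag token is seen and prepending quote-stripped tokens otherwise, so the surviving accumulator is exactly the pre-flag prefix with no break or index search.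
import Mathlib
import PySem

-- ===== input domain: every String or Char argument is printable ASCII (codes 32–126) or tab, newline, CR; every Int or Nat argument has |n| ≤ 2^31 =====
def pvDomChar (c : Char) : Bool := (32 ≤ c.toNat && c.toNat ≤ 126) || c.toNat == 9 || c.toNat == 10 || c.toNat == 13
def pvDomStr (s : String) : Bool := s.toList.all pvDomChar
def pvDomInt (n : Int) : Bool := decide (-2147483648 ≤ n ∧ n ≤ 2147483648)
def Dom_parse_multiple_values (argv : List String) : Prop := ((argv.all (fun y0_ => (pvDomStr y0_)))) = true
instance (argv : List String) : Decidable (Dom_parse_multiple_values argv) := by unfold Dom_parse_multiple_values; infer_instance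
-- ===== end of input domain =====

-- B replaces A's left-to-right loop with inline break by a right-to-left fold in which a
-- flag token RESETS the accumulator, prepending unquoted tokens otherwise (alternative decomposition).


-- ===== PORT A =====
-- A's for-loop with break: state = accumulated values
def pvA_loop : List String → List String → List String
  | [], values => values
  | arg :: rest, values =>
    if PySem.Str.startswith arg "-" then values
    else
      let arg' :=
        if PySem.Str.startswith arg "\"" && PySem.Str.endswith arg "\"" then
          PySem.Str.slice arg (some 1) (some (-1))
        else if PySem.Str.startswith arg "'" && PySem.Str.endswith arg "'" then
          PySem.Str.slice arg (some 1) (some (-1))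
        else arg
      pvA_loop rest (values ++ [arg'])

def parse_multiple_values (argv : List String) : List String :=
  pvA_loop argv []

-- ===== PORT B =====
-- B's 'arg and arg[0] == arg[-1] and arg[0] in "\"'"': the indexing is guarded by truthiness,
-- so the empty string falls through the match (pyGet? = none exactly on the empty string).
def pvB_unquote (arg : String) : String :=
  match PySem.Str.pyGet? arg 0, PySem.Str.pyGet? arg (-1) with
  | some c0, some cl =>
    if c0 == cl && PySem.Chars.isIn [c0] ("\"'".toList) then
      PySem.Str.slice arg (some 1) (some (-1))
    else arg
  | _, _ => arg

-- the 'for arg in reversed(argv)' loop: append (accumulator in reversed order,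
-- reset to empty on a flag), then one final reverse
def parse_multiple_values_alt (argv : List String) : List String :=
  (argv.reverse.foldl
    (fun values arg =>
      if PySem.Str.startswith arg "-" then []
      else values ++ [pvB_unquote arg])
    []).reverse

-- ===== PRECONDITION & SPEC =====
def Spec_parse_multiple_values (argv : List String) (out : List String) : Prop := out = parse_multiple_values_alt argv
instance (argv : List String) (out : List String) : Decidable (Spec_parse_multiple_values argv out) := by unfold Spec_parse_multiple_values; infer_instance

-- ===== CLAIM (what is proved, stated in full; the proofs are below) =====
def Claim_equal_parse_multiple_values : Prop := ∀ (argv : List String), Dom_parse_multiple_values argv → Spec_parse_multiple_values argv (parse_multiple_values argv)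

-- ===== LEMMAS AND PROOFS =====
theorem sw_single (l : List Char) (c : Char) : PySem.Chars.startswith l [c] = (l.head? == some c) := by
  cases l with
  | nil => simp [PySem.Chars.startswith]
  | cons a r => simp [PySem.Chars.startswith, List.isPrefixOf, eq_comm]

theorem last_suffix (l : List Char) (c : Char) : l.getLast? = some c ↔ [c] <:+ l := by
  rw [← List.reverse_prefix, show ([c] : List Char).reverse = [c] from rfl]
  cases h : l.reverse with
  | nil => simp [← List.head?_reverse, h]
  | cons a r =>
    rw [← List.head?_reverse, h]
    simp [List.cons_prefix_cons, eq_comm]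

theorem ew_single (l : List Char) (c : Char) : PySem.Chars.endswith l [c] = (l.getLast? == some c) := by
  rcases hg : l.getLast? with _ | d
  · rw [show ((none : Option Char) == some c) = false from rfl, Bool.eq_false_iff]
    intro h
    have := (last_suffix l c).mpr ((PySem.Chars.endswith_iff l [c]).mp h)
    rw [hg] at this; simp at this
  · by_cases hdc : c = d
    · subst hdc
      simp only [beq_self_eq_true]
      exact (PySem.Chars.endswith_iff l [c]).mpr ((last_suffix l c).mp hg)
    · have h2 : (some d == some c) = false := by
        rw [Bool.eq_false_iff]
        intro h
        exact hdc (Option.some.inj (eq_of_beq h)).symm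
      rw [h2, Bool.eq_false_iff]
      intro h
      have := (last_suffix l c).mpr ((PySem.Chars.endswith_iff l [c]).mp h)
      rw [hg] at this
      exact hdc (Option.some.inj this).symm

theorem isIn_quotes (c : Char) : PySem.Chars.isIn [c] ("\"'".toList) = (c == '"' || c == '\'') := by
  rcases h1 : (c == '"') with _|_ <;> rcases h2 : (c == '\'') with _|_ <;>
    simp_all [PySem.Chars.isIn, PySem.Chars.find, PySem.Chars.find.go]

-- B's per-token transform computes exactly A's inline quote-stripping
theorem unquote_eq (s : String) :
    pvB_unquote s =
      (if PySem.Str.startswith s "\"" && PySem.Str.endswith s "\"" then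
        PySem.Str.slice s (some 1) (some (-1))
      else if PySem.Str.startswith s "'" && PySem.Str.endswith s "'" then
        PySem.Str.slice s (some 1) (some (-1))
      else s) := by
  have h0 : PySem.Str.pyGet? s 0 = s.toList.head? := by
    simp [pysem, (List.head?_eq_getElem? (l := s.toList)).symm]
  have hm1 : PySem.Str.pyGet? s (-1) = s.toList.getLast? := by simp [pysem]
  have htq : ("\"" : String).toList = ['"'] := by decide
  have hts : ("'" : String).toList = ['\''] := by decide
  have hsw : ∀ c : Char, PySem.Chars.startswith s.toList [c] = (s.toList.head? == some c) :=
    fun c => sw_single s.toList c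
  have hew : ∀ c : Char, PySem.Chars.endswith s.toList [c] = (s.toList.getLast? == some c) :=
    fun c => ew_single s.toList c
  unfold pvB_unquote
  rw [h0, hm1, PySem.Str.startswith_eq, PySem.Str.startswith_eq,
    PySem.Str.endswith_eq, PySem.Str.endswith_eq, htq, hts, hsw, hsw, hew, hew]
  rcases hh : s.toList.head? with _ | c0
  · have : s.toList.getLast? = none := by
      rcases hg : s.toList.getLast? with _ | d
      · rfl
      · exfalso
        rcases (last_suffix _ _).mp hg with ⟨t, ht⟩
        rw [← ht] at hh; simp at hh
    rw [this]; rfl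
  · rcases hg : s.toList.getLast? with _ | cl
    · exfalso
      rcases hx : s.toList with _ | ⟨a, r⟩
      · rw [hx] at hh; simp at hh
      · rw [hx] at hg; simp at hg
    · simp only [isIn_quotes]
      rcases e1 : (c0 == cl) with _|_ <;>
      rcases e2 : (c0 == '"') with _|_ <;>
      rcases e3 : (c0 == '\'') with _|_ <;>
      rcases e4 : (cl == '"') with _|_ <;>
      rcases e5 : (cl == '\'') with _|_ <;>
        simp_all

-- B's reversed-accumulator fold, characterised as a right fold that prepends
theorem pvB_spec (argv : List String) :
    parse_multiple_values_alt argv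
      = argv.foldr
          (fun arg values =>
            if PySem.Str.startswith arg "-" then []
            else pvB_unquote arg :: values)
          [] := by
  unfold parse_multiple_values_alt
  rw [List.foldl_reverse]
  induction argv with
  | nil => rfl
  | cons arg rest ih =>
    simp only [List.foldr_cons]
    cases h : PySem.Str.startswith arg "-" with
    | true => simp
    | false =>
      simp only [Bool.false_eq_true, if_false, List.reverse_append, List.reverse_cons,
        List.reverse_nil, List.nil_append, List.singleton_append, ih]

theorem pvA_loop_eq (xs : List String) : ∀ acc : List String,
    pvA_loop xs acc = acc ++ parse_multiple_values_alt xs := by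
  induction xs with
  | nil => intro acc; simp [pvA_loop, parse_multiple_values_alt]

  | cons arg rest ih =>
    intro acc
    rw [pvB_spec, List.foldr_cons, ← pvB_spec]
    cases h : PySem.Str.startswith arg "-" with
    | true => simp only [pvA_loop, h]; simp
    | false =>
      simp only [pvA_loop, h, Bool.false_eq_true, if_false, ih, unquote_eq]
      simp

-- ===== VERDICT (by name: the statement is the Claim_ definition above) =====
theorem parse_multiple_values_spec : Claim_equal_parse_multiple_values := by
  intro argv _
  unfold Spec_parse_multiple_values parse_multiple_values
  simpa using pvA_loop_eq argv []
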